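-- pv_equiv track=rewrite | github.com/pankdm/icfpc-2024 | solvers/3d/clean2.py | postprocess_value
-- ===== SOURCE A (Python) =====
-- def postprocess_value(value):
--     if value in ["*", "=", "<", ">"]:
--         return value
--     elif "*" in value:
--         return "."
--     elif "<" in value:
--         # note: recursive
--         return postprocess_value(value.split("<")[0])
--     elif ">" in value:
--         # note: recursive
--         return postprocess_value(value.split(">")[0])
--     elif "=" in value:
--         return value.split("=")[1]
--     elif value == "":
--         return "."
--     else:
--         return value
-- ===== SOURCE B (Python) =====
-- def postprocess_value(value):
--     while True:
--         if value in ("*", "=", "<", ">"):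
--             return value
--         if "*" in value:
--             return "."
--         i = value.find("<")
--         if i >= 0:
--             value = value[:i]
--             continue
--         j = value.find(">")
--         if j >= 0:
--             value = value[:j]
--             continue
--         k = value.find("=")
--         if k >= 0:
--             rest = value[k + 1:]
--             m = rest.find("=")
--             return rest if m < 0 else rest[:m]
--         return "." if value == "" else value
-- ===== Notes on version B (the rewrite author's own statement) =====
-- stated objective: alternative
-- what changed: A peels the prefix before the first '<' or '>' by calling itself recursively through split(); B is an iterative while-loop that keeps the current string as mutable state, truncates it in place at the first separator found with find(), and extracts the text between the first two '=' directly by index slicing instead of split('=')[1].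
import Mathlib
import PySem

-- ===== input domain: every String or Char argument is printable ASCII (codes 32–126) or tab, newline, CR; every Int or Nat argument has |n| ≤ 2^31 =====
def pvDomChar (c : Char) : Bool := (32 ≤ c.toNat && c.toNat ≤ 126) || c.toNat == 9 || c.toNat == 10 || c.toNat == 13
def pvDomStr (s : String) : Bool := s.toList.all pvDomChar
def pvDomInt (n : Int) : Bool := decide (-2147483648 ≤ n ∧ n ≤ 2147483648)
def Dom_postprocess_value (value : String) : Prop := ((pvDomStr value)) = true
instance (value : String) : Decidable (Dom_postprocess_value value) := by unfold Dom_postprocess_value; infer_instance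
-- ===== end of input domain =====

-- B rewrites A's prefix-peeling recursion as an iterative loop that keeps the current
-- string as mutable state, truncating it in place at the first separator (objective: alternative).

-- ===== PORT A =====
-- termination helper: the piece before the first separator is strictly shorter
theorem pvTakeWhile_ne_lt {c : Char} {l : List Char} (h : c ∈ l) :
    (l.takeWhile (· != c)).length < l.length := by
  rcases Nat.lt_or_ge (l.takeWhile (· != c)).length l.length with h1 | h1
  · exact h1
  · exfalso
    have hle := (List.takeWhile_prefix (p := (· != c)) (l := l)).length_le
    have heq : l.takeWhile (· != c) = l := by
      apply List.IsPrefix.eq_of_length (List.takeWhile_prefix _)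
      omega
    have := List.mem_takeWhile_imp (p := (· != c)) (l := l) (by rw [heq]; exact h)
    simp at this

-- pvParts c l = the Python l.split(c) for a one-character separator (structural form of
-- PySem.Chars.splitOn, proved equal below; used to reason about A's split calls)
def pvParts (c : Char) : List Char → List (List Char)
  | [] => [[]]
  | x :: xs => if x = c then [] :: pvParts c xs else (pvParts c xs).modifyHead (x :: ·)

theorem pvParts_ne_nil (c : Char) (l : List Char) : pvParts c l ≠ [] := by
  cases l with
  | nil => simp [pvParts]
  | cons x xs =>
    simp only [pvParts]
    split
    · simp
    · cases h : pvParts c xs with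
      | nil => exact absurd h (pvParts_ne_nil c xs)
      | cons a t => simp

theorem pvSplitOn_go (c : Char) (l : List Char) : ∀ (fuel : Nat), l.length ≤ fuel →
    ∀ (cur : List Char) (acc : List (List Char)),
    PySem.Chars.splitOn.go [c] fuel l cur acc
      = acc.reverse ++ (pvParts c l).modifyHead (cur.reverse ++ ·) := by
  induction l with
  | nil =>
    intro fuel _ cur acc
    cases fuel <;> simp [PySem.Chars.splitOn.go, pvParts]
  | cons x xs ih =>
    intro fuel hf cur acc
    cases fuel with
    | zero => simp at hf
    | succ f =>
      simp only [PySem.Chars.splitOn.go]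
      by_cases hx : x = c
      · subst hx
        have hpre : List.isPrefixOf [x] (x :: xs) = true := by simp [List.isPrefixOf]
        rw [if_pos hpre]
        simp only [List.length_cons] at hf
        simp only [List.length_cons, List.length_nil, List.drop_succ_cons, List.drop_zero]
        rw [ih f (by omega) [] (cur.reverse :: acc)]
        cases h : pvParts x xs with
        | nil => exact absurd h (pvParts_ne_nil x xs)
        | cons a t => simp [pvParts, h]
      · have hpre : List.isPrefixOf [c] (x :: xs) = false := by
          simp [List.isPrefixOf]; exact fun h => absurd h.symm hx
        rw [if_neg (by simp [hpre])]
        simp only [List.length_cons] at hf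
        rw [ih f (by omega) (x :: cur) acc]
        cases h : pvParts c xs with
        | nil => exact absurd h (pvParts_ne_nil c xs)
        | cons a t => simp [pvParts, h, if_neg hx]

theorem pvSplitOn_single (c : Char) (l : List Char) :
    PySem.Chars.splitOn l [c] = pvParts c l := by
  rw [PySem.Chars.splitOn, pvSplitOn_go c l (l.length + 1) (by omega) [] []]
  cases h : pvParts c l with
  | nil => exact absurd h (pvParts_ne_nil c l)
  | cons a t => simp

theorem pvParts_getD_zero (c : Char) (l : List Char) :
    (pvParts c l).getD 0 [] = l.takeWhile (· != c) := by
  induction l with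
  | nil => simp [pvParts]
  | cons x xs ih =>
    simp only [pvParts]
    by_cases hx : x = c
    · subst hx; simp [List.takeWhile_cons]
    · rw [if_neg hx]
      cases h : pvParts c xs with
      | nil => exact absurd h (pvParts_ne_nil c xs)
      | cons a t =>
        rw [h] at ih
        simp [List.takeWhile_cons, hx, ← ih]

def pvA (cs : List Char) : List Char :=
  if cs = ['*'] ∨ cs = ['='] ∨ cs = ['<'] ∨ cs = ['>'] then cs
  else if PySem.Chars.isIn ['*'] cs then ['.']
  else if h1 : PySem.Chars.isIn ['<'] cs then
    pvA (PySem.List.pyGetD (PySem.Chars.splitOn cs ['<']) 0 [])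
  else if h2 : PySem.Chars.isIn ['>'] cs then
    pvA (PySem.List.pyGetD (PySem.Chars.splitOn cs ['>']) 0 [])
  else if PySem.Chars.isIn ['='] cs then
    PySem.List.pyGetD (PySem.Chars.splitOn cs ['=']) 1 []
  else if cs = [] then ['.']
  else cs
termination_by cs.length
decreasing_by
  · have hm : '<' ∈ cs := by
      have := (PySem.Chars.isIn_iff_infix (sub := ['<']) (s := cs)).mp h1
      exact (List.singleton_infix_iff _ _).mp this
    simp only [pvSplitOn_single, PySem.List.pyGetD_zero]
    rw [pvParts_getD_zero]
    exact pvTakeWhile_ne_lt hm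
  · have hm : '>' ∈ cs := by
      have := (PySem.Chars.isIn_iff_infix (sub := ['>']) (s := cs)).mp h2
      exact (List.singleton_infix_iff _ _).mp this
    simp only [pvSplitOn_single, PySem.List.pyGetD_zero]
    rw [pvParts_getD_zero]
    exact pvTakeWhile_ne_lt hm

def postprocess_value (value : String) : String :=
  String.ofList (pvA value.toList)

-- ===== PORT B =====
-- one iteration of B's while-loop: .inl result = return, .inr cs' = 'value = cs'; continue'
def pvBstep (cs : List Char) : List Char ⊕ List Char :=
  if cs = ['*'] ∨ cs = ['='] ∨ cs = ['<'] ∨ cs = ['>'] then Sum.inl cs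
  else if PySem.Chars.isIn ['*'] cs then Sum.inl ['.']
  else
    let i := PySem.Chars.find cs ['<']
    if 0 ≤ i then Sum.inr (PySem.List.slice cs none (some i))
    else
      let j := PySem.Chars.find cs ['>']
      if 0 ≤ j then Sum.inr (PySem.List.slice cs none (some j))
      else
        let k := PySem.Chars.find cs ['=']
        if 0 ≤ k then
          let rest := PySem.List.slice cs (some (k + 1)) none
          let m := PySem.Chars.find rest ['=']
          Sum.inl (if m < 0 then rest else PySem.List.slice rest none (some m))
        else Sum.inl (if cs = [] then ['.'] else cs)

-- lemmas the B port needs for termination (the loop's truncation shortens the string)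
theorem pvTW_take (p : Char → Bool) (l : List Char) :
    l.takeWhile p = l.take (l.takeWhile p).length := by
  induction l with
  | nil => simp
  | cons x xs ih =>
    by_cases hx : p x
    · simp [List.takeWhile_cons, hx, ← ih]
    · simp [List.takeWhile_cons, hx]

theorem pvDW_drop (p : Char → Bool) (l : List Char) :
    l.dropWhile p = l.drop (l.takeWhile p).length := by
  induction l with
  | nil => simp
  | cons x xs ih =>
    by_cases hx : p x
    · simp [List.takeWhile_cons, List.dropWhile_cons, hx, ih]
    · simp [List.takeWhile_cons, List.dropWhile_cons, hx]

theorem pvDropWhile_mem {c : Char} {l : List Char} (h : c ∈ l) :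
    ∃ t, l.dropWhile (· != c) = c :: t := by
  induction l with
  | nil => simp at h
  | cons x xs ih =>
    by_cases hx : x = c
    · subst hx; exact ⟨xs, by simp [List.dropWhile_cons]⟩
    · have hxs : c ∈ xs := by
        rcases List.mem_cons.mp h with h1 | h1
        · exact absurd h1.symm hx
        · exact h1
      obtain ⟨t, ht⟩ := ih hxs
      exact ⟨t, by simp [List.dropWhile_cons, hx, ht]⟩

theorem pvFind_mem {c : Char} {l : List Char} (h : c ∈ l) :
    PySem.Chars.find l [c] = ((l.takeWhile (· != c)).length : Int) := by
  have hinf : [c] <:+: l := (List.singleton_infix_iff _ _).mpr h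
  have h0 : 0 ≤ PySem.Chars.find l [c] := (PySem.Chars.find_nonneg_iff _ _).mpr hinf
  obtain ⟨hpre, hmin⟩ := PySem.Chars.find_spec (s := l) (sub := [c]) h0
  obtain ⟨t, ht⟩ := pvDropWhile_mem h
  have hdrop : l.drop (l.takeWhile (· != c)).length = c :: t := by
    rw [← pvDW_drop]; exact ht
  have hpn : [c] <+: l.drop (l.takeWhile (· != c)).length := by
    rw [hdrop]; exact ⟨t, rfl⟩
  have hlow : ∀ i, i < (l.takeWhile (· != c)).length → ¬ [c] <+: l.drop i := by
    intro i hi hp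
    have hhd : (l.drop i).head? = some c := by
      rcases hp with ⟨u, hu⟩; rw [← hu]; rfl
    rw [List.head?_drop] at hhd
    have hmem : c ∈ l.takeWhile (· != c) := by
      have : (l.takeWhile (· != c))[i]? = some c := by
        rw [pvTW_take (· != c) l, List.getElem?_take_of_lt hi]
        exact hhd
      exact List.mem_of_getElem? this
    have := List.mem_takeWhile_imp hmem
    simp at this
  have h1 : (PySem.Chars.find l [c]).toNat ≤ (l.takeWhile (· != c)).length := by
    by_contra hc
    push_neg at hc
    exact hmin _ hc hpn
  have h2 : (l.takeWhile (· != c)).length ≤ (PySem.Chars.find l [c]).toNat := by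
    by_contra hc
    push_neg at hc
    exact hlow _ hc hpre
  omega

theorem pvFind_nonneg_mem {c : Char} {l : List Char}
    (h : 0 ≤ PySem.Chars.find l [c]) : c ∈ l := by
  rw [PySem.Chars.find_nonneg_iff, List.singleton_infix_iff] at h
  exact h

theorem pvBstep_lt {cs cs' : List Char} (h : pvBstep cs = Sum.inr cs') :
    cs'.length < cs.length := by
  simp only [pvBstep] at h
  split_ifs at h with hlit hstar hlt hgt
  · rcases Sum.inr.inj h.symm with rfl
    have hm : '<' ∈ cs := pvFind_nonneg_mem hlt
    rw [pvFind_mem hm, PySem.List.slice_to_natCast, ← pvTW_take]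
    exact pvTakeWhile_ne_lt hm
  · rcases Sum.inr.inj h.symm with rfl
    have hm : '>' ∈ cs := pvFind_nonneg_mem hgt
    rw [pvFind_mem hm, PySem.List.slice_to_natCast, ← pvTW_take]
    exact pvTakeWhile_ne_lt hm
  all_goals simp_all

def pvBloop (cs : List Char) : List Char :=
  match h : pvBstep cs with
  | Sum.inl r => r
  | Sum.inr cs' => pvBloop cs'
termination_by cs.length
decreasing_by exact pvBstep_lt h

def postprocess_value_alt (value : String) : String :=
  String.ofList (pvBloop value.toList)

-- ===== PRECONDITION & SPEC =====
def Spec_postprocess_value (value : String) (out : String) : Prop := out = postprocess_value_alt value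
instance (value : String) (out : String) : Decidable (Spec_postprocess_value value out) := by unfold Spec_postprocess_value; infer_instance

-- ===== CLAIM (what is proved, stated in full; the proofs are below) =====
def Claim_equal_postprocess_value : Prop := ∀ (value : String), Dom_postprocess_value value → Spec_postprocess_value value (postprocess_value value)

-- ===== LEMMAS AND PROOFS =====

theorem pvFind_not_mem {c : Char} {l : List Char} (h : c ∉ l) :
    PySem.Chars.find l [c] = -1 := by
  rw [PySem.Chars.find_eq_neg_one_iff, List.singleton_infix_iff]
  exact h

theorem pvParts_getD_one (c : Char) (l : List Char) (h : c ∈ l) :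
    (pvParts c l).getD 1 []
      = ((l.dropWhile (· != c)).tail).takeWhile (· != c) := by
  induction l with
  | nil => simp at h
  | cons x xs ih =>
    simp only [pvParts]
    by_cases hx : x = c
    · subst hx
      rw [if_pos rfl]
      have h0 : (([] : List Char) :: pvParts x xs).getD 1 [] = (pvParts x xs).getD 0 [] := rfl
      rw [h0, pvParts_getD_zero]
      simp [List.dropWhile_cons]
    · have hxs : c ∈ xs := by
        rcases List.mem_cons.mp h with h1 | h1
        · exact absurd h1.symm hx
        · exact h1
      rw [if_neg hx]
      cases hp : pvParts c xs with
      | nil => exact absurd hp (pvParts_ne_nil c xs)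
      | cons a t =>
        rw [hp] at ih
        simp only [List.modifyHead_cons, List.getD_cons_succ] at *
        rw [ih hxs]
        simp [List.dropWhile_cons, hx]

-- the value between the first and second '=', and the cascade tail both ports share
def pvT (m : List Char) : List Char := ((m.dropWhile (· != '=')).tail).takeWhile (· != '=')

def pvF (m : List Char) : List Char := if '=' ∈ m then pvT m else if m = [] then ['.'] else m

theorem pvMem_isIn (c : Char) (l : List Char) : PySem.Chars.isIn [c] l = true ↔ c ∈ l := by
  rw [PySem.Chars.isIn_iff_infix, List.singleton_infix_iff]

theorem pvTW_all {p : Char → Bool} {l : List Char} (h : ∀ x ∈ l, p x = true) :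
    l.takeWhile p = l := by
  induction l with
  | nil => simp
  | cons x xs ih =>
    rw [List.takeWhile_cons, if_pos (h x (by simp))]
    rw [ih (fun y hy => h y (by simp [hy]))]

-- A's split('=')[1] equals pvT on '='-containing input
theorem pvPieceA {m : List Char} (h : '=' ∈ m) :
    PySem.List.pyGetD (PySem.Chars.splitOn m ['=']) 1 [] = pvT m := by
  have hgd : PySem.List.pyGetD (pvParts '=' m) 1 [] = (pvParts '=' m).getD 1 [] := by
    by_cases hlen : 1 < (pvParts '=' m).length
    · simp [PySem.List.pyGetD, PySem.List.pyGet?, PySem.List.pyIdx?, hlen,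
        List.getD_eq_getElem?_getD]
    · simp [PySem.List.pyGetD, PySem.List.pyGet?, PySem.List.pyIdx?, hlen,
        List.getD_eq_getElem?_getD,
        List.getElem?_eq_none (by omega : (pvParts '=' m).length ≤ 1)]
  rw [pvSplitOn_single, hgd, pvParts_getD_one '=' m h]
  rfl

theorem pvA_lit {cs : List Char}
    (h : cs = ['*'] ∨ cs = ['='] ∨ cs = ['<'] ∨ cs = ['>']) : pvA cs = cs := by
  rw [pvA, if_pos h]

theorem pvA_step_lt {cs : List Char}
    (hlit : ¬(cs = ['*'] ∨ cs = ['='] ∨ cs = ['<'] ∨ cs = ['>']))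
    (hstar : '*' ∉ cs) (h : '<' ∈ cs) :
    pvA cs = pvA (cs.takeWhile (· != '<')) := by
  rw [pvA, if_neg hlit, if_neg (mt (pvMem_isIn '*' cs).mp hstar),
    dif_pos ((pvMem_isIn '<' cs).mpr h)]
  congr 1
  simp only [pvSplitOn_single, PySem.List.pyGetD_zero]
  rw [pvParts_getD_zero]

theorem pvA_step_gt {cs : List Char}
    (hlit : ¬(cs = ['*'] ∨ cs = ['='] ∨ cs = ['<'] ∨ cs = ['>']))
    (hstar : '*' ∉ cs) (hlt : '<' ∉ cs) (h : '>' ∈ cs) :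
    pvA cs = pvA (cs.takeWhile (· != '>')) := by
  rw [pvA, if_neg hlit, if_neg (mt (pvMem_isIn '*' cs).mp hstar),
    dif_neg (mt (pvMem_isIn '<' cs).mp hlt), dif_pos ((pvMem_isIn '>' cs).mpr h)]
  congr 1
  simp only [pvSplitOn_single, PySem.List.pyGetD_zero]
  rw [pvParts_getD_zero]

theorem pvA_base {m : List Char}
    (hlit : ¬(m = ['*'] ∨ m = ['='] ∨ m = ['<'] ∨ m = ['>']))
    (hstar : '*' ∉ m) (hlt : '<' ∉ m) (hgt : '>' ∉ m) :
    pvA m = pvF m := by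
  rw [pvA, if_neg hlit, if_neg (mt (pvMem_isIn '*' m).mp hstar),
    dif_neg (mt (pvMem_isIn '<' m).mp hlt), dif_neg (mt (pvMem_isIn '>' m).mp hgt)]
  by_cases he : '=' ∈ m
  · rw [if_pos ((pvMem_isIn '=' m).mpr he), pvPieceA he]
    simp [pvF, he]
  · rw [if_neg (mt (pvMem_isIn '=' m).mp he)]
    simp [pvF, he]

-- B's rest = value[k+1:] is the tail after the first '='
theorem pvRest {m : List Char} (he : '=' ∈ m) :
    PySem.List.slice m (some (PySem.Chars.find m ['='] + 1)) none
      = (m.dropWhile (· != '=')).tail := by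
  rw [pvFind_mem he, PySem.List.slice_from m (by omega)]
  have h1 : (((m.takeWhile (· != '=')).length : Int) + 1).toNat
      = (m.takeWhile (· != '=')).length + 1 := by omega
  rw [h1, ← List.tail_drop, ← pvDW_drop]

-- B's cut of rest at its first '=' equals pvT
theorem pvPieceB {m : List Char} (he : '=' ∈ m) :
    (if PySem.Chars.find ((m.dropWhile (· != '=')).tail) ['='] < 0
     then (m.dropWhile (· != '=')).tail
     else PySem.List.slice ((m.dropWhile (· != '=')).tail) none
            (some (PySem.Chars.find ((m.dropWhile (· != '=')).tail) ['=']))) = pvT m := by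
  by_cases hr : '=' ∈ (m.dropWhile (· != '=')).tail
  · rw [pvFind_mem hr]
    have hne : ¬ ((((m.dropWhile (· != '=')).tail).takeWhile (· != '=')).length : Int) < 0 := by
      omega
    rw [if_neg hne, PySem.List.slice_to_natCast]
    rw [pvT, ← pvTW_take]
  · rw [pvFind_not_mem hr, if_pos (by omega), pvT]
    refine (pvTW_all (fun x hx => ?_)).symm
    have : x ≠ '=' := fun hc => hr (hc ▸ hx)
    simp [this]

-- characterisation of one loop iteration of B in each case of the cascade
theorem pvBstep_lit {cs : List Char}
    (h : cs = ['*'] ∨ cs = ['='] ∨ cs = ['<'] ∨ cs = ['>']) :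
    pvBstep cs = Sum.inl cs := by
  rw [pvBstep, if_pos h]

theorem pvBstep_star {cs : List Char}
    (hlit : ¬(cs = ['*'] ∨ cs = ['='] ∨ cs = ['<'] ∨ cs = ['>']))
    (hstar : '*' ∈ cs) :
    pvBstep cs = Sum.inl ['.'] := by
  rw [pvBstep, if_neg hlit, if_pos ((pvMem_isIn '*' cs).mpr hstar)]

theorem pvBstep_cut_lt {cs : List Char}
    (hlit : ¬(cs = ['*'] ∨ cs = ['='] ∨ cs = ['<'] ∨ cs = ['>']))
    (hstar : '*' ∉ cs) (h : '<' ∈ cs) :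
    pvBstep cs = Sum.inr (cs.takeWhile (· != '<')) := by
  rw [pvBstep, if_neg hlit, if_neg (mt (pvMem_isIn '*' cs).mp hstar)]
  simp only [pvFind_mem h]
  rw [if_pos (by omega), PySem.List.slice_to_natCast, ← pvTW_take]

theorem pvBstep_cut_gt {cs : List Char}
    (hlit : ¬(cs = ['*'] ∨ cs = ['='] ∨ cs = ['<'] ∨ cs = ['>']))
    (hstar : '*' ∉ cs) (hlt : '<' ∉ cs) (h : '>' ∈ cs) :
    pvBstep cs = Sum.inr (cs.takeWhile (· != '>')) := by
  rw [pvBstep, if_neg hlit, if_neg (mt (pvMem_isIn '*' cs).mp hstar)]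
  simp only [pvFind_not_mem hlt, pvFind_mem h]
  rw [if_neg (by omega), if_pos (by omega), PySem.List.slice_to_natCast, ← pvTW_take]

theorem pvBstep_base {m : List Char}
    (hlit : ¬(m = ['*'] ∨ m = ['='] ∨ m = ['<'] ∨ m = ['>']))
    (hstar : '*' ∉ m) (hlt : '<' ∉ m) (hgt : '>' ∉ m) :
    pvBstep m = Sum.inl (pvF m) := by
  rw [pvBstep, if_neg hlit, if_neg (mt (pvMem_isIn '*' m).mp hstar)]
  simp only [pvFind_not_mem hlt, pvFind_not_mem hgt]
  rw [if_neg (by omega), if_neg (by omega)]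
  by_cases he : '=' ∈ m
  · rw [if_pos (by rw [pvFind_mem he]; omega)]
    simp only [pvRest he]
    rw [pvPieceB he]
    simp [pvF, he]
  · rw [if_neg (by rw [pvFind_not_mem he]; omega)]
    simp [pvF, he]

theorem pvBloop_inl {cs r : List Char} (h : pvBstep cs = Sum.inl r) :
    pvBloop cs = r := by
  rw [pvBloop, h]

theorem pvBloop_inr {cs cs' : List Char} (h : pvBstep cs = Sum.inr cs') :
    pvBloop cs = pvBloop cs' := by
  rw [pvBloop, h]

theorem pvMain (cs : List Char) : pvA cs = pvBloop cs := by
  by_cases hlit : cs = ['*'] ∨ cs = ['='] ∨ cs = ['<'] ∨ cs = ['>']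
  · rw [pvA_lit hlit, pvBloop_inl (pvBstep_lit hlit)]
  · by_cases hstar : '*' ∈ cs
    · rw [pvBloop_inl (pvBstep_star hlit hstar), pvA, if_neg hlit,
        if_pos ((pvMem_isIn '*' cs).mpr hstar)]
    · by_cases hlt : '<' ∈ cs
      · rw [pvA_step_lt hlit hstar hlt, pvBloop_inr (pvBstep_cut_lt hlit hstar hlt)]
        exact pvMain (cs.takeWhile (· != '<'))
      · by_cases hgt : '>' ∈ cs
        · rw [pvA_step_gt hlit hstar hlt hgt,
            pvBloop_inr (pvBstep_cut_gt hlit hstar hlt hgt)]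
          exact pvMain (cs.takeWhile (· != '>'))
        · rw [pvA_base hlit hstar hlt hgt,
            pvBloop_inl (pvBstep_base hlit hstar hlt hgt)]
termination_by cs.length
decreasing_by
  · exact pvTakeWhile_ne_lt hlt
  · exact pvTakeWhile_ne_lt hgt

-- ===== VERDICT (by name: the statement is the Claim_ definition above) =====
theorem postprocess_value_spec : Claim_equal_postprocess_value := by
  intro value _
  unfold Spec_postprocess_value postprocess_value postprocess_value_alt
  rw [pvMain]
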